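-- pv_equiv track=rewrite | github.com/qawesrdtfy/CAT | BuildCAS/utils.py | match_sentence_capital
-- ===== SOURCE A (Python) =====
-- def find_sublist_index(sublist, mainlist):
--     # 子列表长度
--     sublist_len = len(sublist)
--     # 主列表长度
--     mainlist_len = len(mainlist)
--
--     # 遍历主列表，寻找子列表的开始位置
--     for i in range(mainlist_len - sublist_len + 1):
--         # 如果在主列表中找到了子列表的开始元素，并且接下来的元素也匹配
--         if mainlist[i:i+sublist_len] == sublist:
--             return i  # 返回子列表的开始下标
--     return -1  # 如果没有找到，返回-1
--
-- def match_sentence_capital(origin_sentence: str, parts: set):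
--     """
--         如果part在origin_sentence里（无论大小写），就返回origin_sentence里对应的样子。
--     """
--     rets = set()
--     origin_sentence_list = origin_sentence.rstrip('.').split(' ')
--     origin_sentence_lower = origin_sentence.rstrip('.').lower()
--     for part in parts:
--         # 如果无论大小写part在origin_sentence里，返回origin_sentence里对应的样子
--         origin_sentence_lower_list = origin_sentence_lower.split(' ')
--         part_lower_list = part.lower().split(' ')
--         start_i = find_sublist_index(part_lower_list, origin_sentence_lower_list)
--         if start_i != -1:
--             rets.add(' '.join(origin_sentence_list[start_i:start_i+len(part_lower_list)]))
--     return rets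
-- ===== SOURCE B (Python) =====
-- def match_sentence_capital(origin_sentence: str, parts: set):
--     """
--         如果part在origin_sentence里（无论大小写），就返回origin_sentence里对应的样子。
--     """
--     base = origin_sentence.rstrip('.')
--     words = base.split(' ')
--     lwords = base.lower().split(' ')
--     # word -> list of positions, built once: candidate starts come from this index
--     index = {}
--     for i, w in enumerate(lwords):
--         index.setdefault(w, []).append(i)
--     rets = set()
--     for part in parts:
--         p = part.lower().split(' ')
--         m = len(p)
--         for i in index.get(p[0], []):
--             if lwords[i:i+m] == p:
--                 rets.add(' '.join(words[i:i+m]))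
--                 break
--     return rets
-- ===== Notes on version B (the rewrite author's own statement) =====
-- stated objective: faster
-- what changed: B splits and lowers the sentence once and builds a word-to-positions index, then for each part tries only the positions of the part's first word as match starts, instead of A's per-part re-split of the sentence plus a naive scan of every start position.
import Mathlib
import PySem

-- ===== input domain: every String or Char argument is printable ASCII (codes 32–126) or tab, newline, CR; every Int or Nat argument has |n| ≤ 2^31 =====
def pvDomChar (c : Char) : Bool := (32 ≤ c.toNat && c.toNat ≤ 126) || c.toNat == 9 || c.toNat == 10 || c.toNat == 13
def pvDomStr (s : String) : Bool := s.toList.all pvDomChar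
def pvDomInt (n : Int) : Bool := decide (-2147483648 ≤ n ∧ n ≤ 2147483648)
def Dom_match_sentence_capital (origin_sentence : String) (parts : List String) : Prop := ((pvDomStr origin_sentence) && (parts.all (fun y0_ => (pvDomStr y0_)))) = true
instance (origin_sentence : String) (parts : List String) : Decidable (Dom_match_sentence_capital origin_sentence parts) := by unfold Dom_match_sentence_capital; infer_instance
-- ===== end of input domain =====

-- B replaces A's per-part naive sublist scan (which also re-splits the lowered sentence for every
-- part) by splitting once and building a word → positions index, so only the positions of a part's
-- first word are tried as match starts.

-- shared primitive helper: exact port of Python's  s.rstrip('.')  (PySem has no rstrip-with-chars):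
-- drop the trailing '.' characters
def pyRstripDot (cs : List Char) : List Char := (cs.reverse.dropWhile (fun c => c == '.')).reverse

-- ===== PORT A =====
def find_sublist_index (sublist mainlist : List (List Char)) : Int :=
  let sublist_len := PySem.List.len sublist
  let mainlist_len := PySem.List.len mainlist
  -- for i in range(mainlist_len - sublist_len + 1): if mainlist[i:i+sublist_len] == sublist: return i
  -- return -1
  (((PySem.List.pyRange 0 (mainlist_len - sublist_len + 1) 1).find?
      (fun i => PySem.List.slice mainlist (some i) (some (i + sublist_len)) == sublist)).getD (-1))

def match_sentence_capital (origin_sentence : String) (parts : List String) : List String :=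
  let rets : PySem.Set String := PySem.Set.empty
  let origin_sentence_list := PySem.Chars.splitOn (pyRstripDot origin_sentence.toList) [' ']
  let origin_sentence_lower := PySem.Chars.lower (pyRstripDot origin_sentence.toList)
  parts.foldl (fun rets part =>
    let origin_sentence_lower_list := PySem.Chars.splitOn origin_sentence_lower [' ']
    let part_lower_list := PySem.Chars.splitOn (PySem.Chars.lower part.toList) [' ']
    let start_i := find_sublist_index part_lower_list origin_sentence_lower_list
    if start_i != -1 then
      PySem.Set.add rets (String.ofList (PySem.Chars.join [' ']
        (PySem.List.slice origin_sentence_list (some start_i)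
          (some (start_i + PySem.List.len part_lower_list)))))
    else rets) rets

-- ===== PORT B =====
-- index = {}; for i, w in enumerate(lwords): index.setdefault(w, []).append(i)
def pvBuildIndex (lwords : List (List Char)) : PySem.Dict (List Char) (List Int) :=
  (PySem.List.enumerate lwords 0).foldl (fun d q => d.modify q.2 [] (fun v => v ++ [q.1])) PySem.Dict.empty

def match_sentence_capital_alt (origin_sentence : String) (parts : List String) : List String :=
  let base := pyRstripDot origin_sentence.toList
  let words := PySem.Chars.splitOn base [' ']
  let lwords := PySem.Chars.splitOn (PySem.Chars.lower base) [' ']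
  let index := pvBuildIndex lwords
  parts.foldl (fun rets part =>
    let p := PySem.Chars.splitOn (PySem.Chars.lower part.toList) [' ']
    let m := PySem.List.len p
    -- for i in index.get(p[0], []): if lwords[i:i+m] == p: rets.add(' '.join(words[i:i+m])); break
    match (index.getD (p.headD []) []).find?
        (fun i => PySem.List.slice lwords (some i) (some (i + m)) == p) with
    | some i =>
        PySem.Set.add rets (String.ofList (PySem.Chars.join [' ']
          (PySem.List.slice words (some i) (some (i + m)))))
    | none => rets) PySem.Set.empty

-- ===== PRECONDITION & SPEC =====
def Spec_match_sentence_capital (origin_sentence : String) (parts : List String) (out : List String) : Prop := out = match_sentence_capital_alt origin_sentence parts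
instance (origin_sentence : String) (parts : List String) (out : List String) : Decidable (Spec_match_sentence_capital origin_sentence parts out) := by unfold Spec_match_sentence_capital; infer_instance

-- ===== CLAIM (what is proved, stated in full; the proofs are below) =====
def Claim_equal_match_sentence_capital : Prop := ∀ (origin_sentence : String) (parts : List String), Dom_match_sentence_capital origin_sentence parts → Spec_match_sentence_capital origin_sentence parts (match_sentence_capital origin_sentence parts)

-- ===== LEMMAS AND PROOFS =====

-- split(' ') never returns the empty list, so every pattern p has a first word
lemma splitOn_go_ne_nil (sep : List Char) (fuel : Nat) (l cur : List Char) (acc : List (List Char)) :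
    PySem.Chars.splitOn.go sep fuel l cur acc ≠ [] := by
  induction fuel generalizing l cur acc with
  | zero => simp [PySem.Chars.splitOn.go]
  | succ fuel ih =>
    cases l with
    | nil => simp [PySem.Chars.splitOn.go]
    | cons c rest =>
      rw [PySem.Chars.splitOn.go]
      split
      · exact ih _ _ _
      · exact ih _ _ _

lemma splitOn_ne_nil (s sep : List Char) : PySem.Chars.splitOn s sep ≠ [] := by
  unfold PySem.Chars.splitOn; exact splitOn_go_ne_nil _ _ _ _ _

-- find? commutes with a filter whose test the predicate implies
lemma find?_filter_of_imp {α : Type} (l : List α) (pr q : α → Bool)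
    (h : ∀ x ∈ l, pr x = true → q x = true) :
    (l.filter q).find? pr = l.find? pr := by
  induction l with
  | nil => rfl
  | cons x t ih =>
    by_cases hq : q x = true
    · simp only [List.filter_cons, hq, if_pos, List.find?_cons]
      cases hpr : pr x <;> simp [ih (fun y hy => h y (List.mem_cons_of_mem _ hy))]
    · have hpr : pr x = false := by
        cases hpr : pr x
        · rfl
        · exact absurd (h x List.mem_cons_self hpr) hq
      simp only [List.filter_cons, hq, List.find?_cons, hpr]
      exact ih (fun y hy => h y (List.mem_cons_of_mem _ hy))

-- a successful match at i needs the whole pattern to fit: i + |p| ≤ |L|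
lemma match_fits (L p : List (List Char)) (i : Int) (hp : p ≠ []) (hi : 0 ≤ i)
    (h : PySem.List.slice L (some i) (some (i + PySem.List.len p)) = p) :
    i.toNat + p.length ≤ L.length := by
  have hplen : 0 < p.length := List.length_pos_iff.mpr hp
  simp only [PySem.List.len_eq] at h
  rw [PySem.List.slice_toNat _ hi (by omega)] at h
  have hl := congrArg List.length h
  simp only [List.length_take, List.length_drop] at hl
  omega

-- a successful match at i starts with p's first word
lemma match_head (L p : List (List Char)) (i : Int) (hp : p ≠ []) (hi : 0 ≤ i)
    (h : PySem.List.slice L (some i) (some (i + PySem.List.len p)) = p) :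
    PySem.List.pyGetD L i [] = p.headD [] := by
  have hfit := match_fits L p i hp hi h
  have hplen : 0 < p.length := List.length_pos_iff.mpr hp
  simp only [PySem.List.len_eq] at h
  rw [PySem.List.slice_toNat _ hi (by omega)] at h
  have hn : (i + (p.length : Int)).toNat - i.toNat = p.length := by omega
  rw [hn] at h
  have hd : L[i.toNat]? = p.head? := by
    rw [← h, List.head?_take, List.head?_drop]
    simp [Nat.pos_iff_ne_zero.mp hplen]
  rw [PySem.List.pyGetD_eq_getElem L ([]) hi (by omega)]
  cases p with
  | nil => exact absurd rfl hp
  | cons w t =>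
    simp only [List.head?_cons, List.headD_cons] at hd ⊢
    exact List.getElem_eq_iff (by omega) |>.mpr hd

-- the index built by B lists exactly the positions of a word, in increasing order
lemma getD_pvBuildIndex (L : List (List Char)) (w : List Char) :
    (pvBuildIndex L).getD w [] =
      (PySem.List.pyRange 0 (PySem.List.len L) 1).filter (fun j => PySem.List.pyGetD L j [] == w) := by
  unfold pvBuildIndex
  have hswap : (PySem.List.enumerate L 0).foldl (fun d q => d.modify q.2 [] (fun v => v ++ [q.1])) PySem.Dict.empty
      = ((PySem.List.enumerate L 0).map (fun q => (q.2, q.1))).foldl (fun d q => d.modify q.1 [] (fun v => v ++ [q.2])) PySem.Dict.empty := by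
    rw [List.foldl_map]
  rw [hswap, PySem.Dict.getD_foldl_modify_append]
  rw [PySem.List.enumerate_eq_map_pyRange (d := [])]
  simp only [List.map_map, List.filter_map, Function.comp_def]
  simp [PySem.List.len_eq, List.map_id']

-- KEY: A's naive range scan and B's index scan find the same first match
lemma find_eq (L p : List (List Char)) (hp : p ≠ []) :
    (PySem.List.pyRange 0 (PySem.List.len L - PySem.List.len p + 1) 1).find?
        (fun i => PySem.List.slice L (some i) (some (i + PySem.List.len p)) == p)
      = ((pvBuildIndex L).getD (p.headD []) []).find?
        (fun i => PySem.List.slice L (some i) (some (i + PySem.List.len p)) == p) := by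
  set pr : Int → Bool := fun i => PySem.List.slice L (some i) (some (i + PySem.List.len p)) == p with hpr
  have hplen : 0 < p.length := List.length_pos_iff.mpr hp
  -- RHS: the index positions are the filtered full range; the filter may be dropped
  rw [getD_pvBuildIndex]
  rw [find?_filter_of_imp _ pr _ (by
    intro i hi hpri
    have hmem := PySem.List.mem_pyRange_one.mp hi
    have := match_head L p i hp hmem.1 (by simpa [hpr, beq_iff_eq] using hpri)
    simp [this])]
  -- LHS: extend A's clipped range to the full range (no match fits beyond it)
  by_cases hfit : PySem.List.len L - PySem.List.len p + 1 ≤ 0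
  · rw [PySem.List.pyRange_one_eq_nil (by omega), List.find?_nil]
    symm
    rw [List.find?_eq_none]
    intro i hi hpri
    have hmem := PySem.List.mem_pyRange_one.mp hi
    have := match_fits L p i hp hmem.1 (by simpa [hpr, beq_iff_eq] using hpri)
    simp [PySem.List.len_eq] at hfit hmem
    omega
  · rw [PySem.List.pyRange_one_append 0 (PySem.List.len L - PySem.List.len p + 1) (PySem.List.len L)
      (by omega) (by simp [PySem.List.len_eq]; omega)]
    rw [List.find?_append]
    have hnone : (PySem.List.pyRange (PySem.List.len L - PySem.List.len p + 1) (PySem.List.len L) 1).find? pr = none := by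
      rw [List.find?_eq_none]
      intro i hi hpri
      have hmem := PySem.List.mem_pyRange_one.mp hi
      have h0i : 0 ≤ i := le_trans (by omega) hmem.1
      have := match_fits L p i hp h0i (by simpa [hpr, beq_iff_eq] using hpri)
      simp [PySem.List.len_eq] at hmem
      omega
    rw [hnone, Option.or_none]

-- per-part: A's branch computes exactly B's branch
lemma body_eq (L words p : List (List Char)) (hp : p ≠ []) (rets : PySem.Set String) :
    (if find_sublist_index p L != -1 then
      PySem.Set.add rets (String.ofList (PySem.Chars.join [' ']
        (PySem.List.slice words (some (find_sublist_index p L))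
          (some (find_sublist_index p L + PySem.List.len p)))))
    else rets)
    = (match ((pvBuildIndex L).getD (p.headD []) []).find?
          (fun i => PySem.List.slice L (some i) (some (i + PySem.List.len p)) == p) with
      | some i => PySem.Set.add rets (String.ofList (PySem.Chars.join [' ']
          (PySem.List.slice words (some i) (some (i + PySem.List.len p)))))
      | none => rets) := by
  have hfsi : find_sublist_index p L =
      (((pvBuildIndex L).getD (p.headD []) []).find?
        (fun i => PySem.List.slice L (some i) (some (i + PySem.List.len p)) == p)).getD (-1) := by
    simp only [find_sublist_index]
    rw [find_eq L p hp]
  cases hF : ((pvBuildIndex L).getD (p.headD []) []).find?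
      (fun i => PySem.List.slice L (some i) (some (i + PySem.List.len p)) == p) with
  | none =>
    rw [hfsi, hF]
    simp
  | some i =>
    have hi0 : 0 ≤ i := by
      have hmem := List.mem_of_find?_eq_some hF
      rw [getD_pvBuildIndex] at hmem
      have := List.mem_of_mem_filter hmem
      exact (PySem.List.mem_pyRange_one.mp this).1
    rw [hfsi, hF]
    simp only [Option.getD_some]
    rw [if_pos (by simp; omega)]

-- ===== VERDICT (by name: the statement is the Claim_ definition above) =====
theorem match_sentence_capital_spec : Claim_equal_match_sentence_capital := by
  intro origin_sentence parts _
  unfold Spec_match_sentence_capital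
  simp only [match_sentence_capital, match_sentence_capital_alt]
  apply PySem.List.foldl_congr_mem
  intro rets part _
  exact body_eq _ _ _ (splitOn_ne_nil _ _) rets
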